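-- pv_equiv track=rewrite | github.com/dannyqiu/advent-of-code | 2017/day09/p1.py | enter_garbage
-- ===== SOURCE A (Python) =====
-- def enter_garbage(data, index):
--     while True:
--         if data[index] == "!":
--             # ignores next character
--             index += 2
--         elif data[index] == ">":
--             # exiting garbage
--             return index + 1
--         else:
--             index += 1
-- ===== SOURCE B (Python) =====
-- def enter_garbage(data, index):
--     i = index
--     while True:
--         j = data.index(">", i)
--         k = j
--         while k > i and data[k - 1] == "!":
--             k -= 1
--         if (j - k) % 2 == 0:
--             return j + 1
--         i = j + 1
-- ===== Notes on version B (the rewrite author's own statement) =====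
-- stated objective: alternative
-- what changed: Replaced A's character-by-character scan (with index += 2 jumps) by a staged search that jumps straight to each '>' via str.index and accepts the first one preceded by an even-length run of '!'.
-- outside the precondition, e.g. on enter_garbage('ab>', -3): A returns 0, B returns 3; on enter_garbage('x>a', -1): A returns 2, B raises ValueError
import Mathlib
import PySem

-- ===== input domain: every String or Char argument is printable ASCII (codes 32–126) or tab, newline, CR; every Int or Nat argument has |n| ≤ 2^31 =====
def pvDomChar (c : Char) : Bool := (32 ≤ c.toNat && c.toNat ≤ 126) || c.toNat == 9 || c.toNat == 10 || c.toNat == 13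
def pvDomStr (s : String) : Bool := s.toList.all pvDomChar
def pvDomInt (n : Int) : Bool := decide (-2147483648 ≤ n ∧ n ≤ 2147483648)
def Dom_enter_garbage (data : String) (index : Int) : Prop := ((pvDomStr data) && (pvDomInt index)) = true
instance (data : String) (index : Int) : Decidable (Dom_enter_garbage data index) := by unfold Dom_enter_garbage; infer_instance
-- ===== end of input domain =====

-- B replaces A's character-by-character scan with a staged search: it jumps with
-- str.index to each '>' candidate and accepts the first one whose immediately
-- preceding run of '!' has even length (alternative decomposition, same O(n) cost).

-- Python raises IndexError exactly when pyGet? is none; this bound justifies termination.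
theorem pvGetSomeRange {data : List Char} {i : Int} {c : Char}
    (h : PySem.List.pyGet? data i = some c) :
    -(data.length : Int) ≤ i ∧ i < (data.length : Int) := by
  have hne : PySem.List.pyGet? data i ≠ none := by simp [h]
  have hir : PySem.Raise.InRange data.length i := by
    by_contra hk
    exact hne ((PySem.List.pyGet?_eq_none_iff _ _).mpr hk)
  simpa [PySem.Raise.InRange] using hir

-- ===== PORT A =====
def pvLoopA (data : List Char) (i : Int) : Int :=
  match h : PySem.List.pyGet? data i with
  | none => 0   -- Python raises IndexError here; such inputs are excluded by Pre_
  | some c =>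
    if c = '!' then pvLoopA data (i + 2)
    else if c = '>' then i + 1
    else pvLoopA data (i + 1)
termination_by ((data.length : Int) - i).toNat
decreasing_by
  · have := pvGetSomeRange h; omega
  · have := pvGetSomeRange h; omega

def enter_garbage (data : String) (index : Int) : Int := pvLoopA data.toList index

-- ===== PORT B =====
-- the inner 'while k > i and data[k-1] == "!"' loop; pyGet? = none (Python IndexError)
-- ends the loop here, which is exact on Pre_ (there 0 ≤ i ≤ k-1 < len, always in range)
def pvRun (data : List Char) (i : Int) (k : Int) : Int :=
  if h : i < k ∧ PySem.List.pyGet? data (k - 1) = some '!' then pvRun data i (k - 1) else k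
termination_by (k - i).toNat
decreasing_by omega

def pvLoopB (data : List Char) (i : Int) : Int :=
  let j := PySem.Chars.findFrom data ['>'] i none
  if j = -1 then 0   -- Python raises ValueError here; such inputs are excluded by Pre_
  else if hb : i < j + 1 ∧ j < (data.length : Int) then
    -- totality guard only: a successful find always satisfies it (pvFindGtBounds below)
    let k := pvRun data i j
    if PySem.Int.mod (j - k) 2 = 0 then j + 1 else pvLoopB data (j + 1)
  else 0
termination_by ((data.length : Int) - i).toNat
decreasing_by omega

def enter_garbage_alt (data : String) (index : Int) : Int := pvLoopB data.toList index

-- ===== PRECONDITION & SPEC =====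
-- length of the maximal run of '!' immediately before position j, cut off at position i
def pvRunBefore (L : List Char) (i j : Nat) : Nat :=
  (((L.take j).drop i).reverse.takeWhile (fun c => c = '!')).length

-- Pre_ excludes (a) the inputs on which A raises IndexError — start index out of range, or
-- garbage whose every '>' is escaped (odd '!'-run before it) so the scan runs off the end —
-- and (b) negative start indices: there A's value comes from Python's negative-index
-- wraparound (the scan serves the string's tail, then restarts at the front), a corner no
-- caller exercises, and B's find-based scan clamps the start, returning a different
-- position or raising ValueError.
def Pre_enter_garbage (data : String) (index : Int) : Prop :=
  0 ≤ index ∧ ∃ j < data.toList.length, index ≤ (j : Int) ∧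
    data.toList[j]? = some '>' ∧ pvRunBefore data.toList index.toNat j % 2 = 0

instance (data : String) (index : Int) : Decidable (Pre_enter_garbage data index) := by
  unfold Pre_enter_garbage; infer_instance

def pvWitness_enter_garbage : String × Int := ("<a!>>", 0)

def Spec_enter_garbage (data : String) (index : Int) (out : Int) : Prop := out = enter_garbage_alt data index
instance (data : String) (index : Int) (out : Int) : Decidable (Spec_enter_garbage data index out) := by unfold Spec_enter_garbage; infer_instance

-- ===== CLAIM (what is proved, stated in full; the proofs are below) =====
def Claim_equal_enter_garbage : Prop := ∀ (data : String) (index : Int), Dom_enter_garbage data index → Pre_enter_garbage data index → Spec_enter_garbage data index (enter_garbage data index)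

-- ===== LEMMAS AND PROOFS =====

-- bounds on a successful find: data.index(">", i) is PySem.Chars.findFrom
-- (str.find with Python's slice-bound start); -1 is Python's ValueError
theorem pvFindGtBounds (data : List Char) (i : Int)
    (h : PySem.Chars.findFrom data ['>'] i none ≠ -1) :
    i ≤ PySem.Chars.findFrom data ['>'] i none ∧
    0 ≤ PySem.Chars.findFrom data ['>'] i none ∧
    PySem.Chars.findFrom data ['>'] i none < (data.length : Int) := by
  unfold PySem.Chars.findFrom at *
  simp only at h ⊢
  set st : Int := (if i < 0 then if i + (data.length:Int) < 0 then 0 else i + (data.length:Int) else i) with hst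
  have hst0 : 0 ≤ st ∧ i ≤ st := by rw [hst]; split_ifs <;> omega
  by_cases hlt : (data.length : Int) < st
  · simp only [if_pos hlt] at h; exact absurd rfl h
  · simp only [if_neg hlt] at h ⊢
    set r : Int := PySem.Chars.find (List.drop st.toNat (List.take (data.length:Int).toNat data)) ['>'] with hr
    by_cases hr1 : r = -1
    · simp only [if_pos hr1] at h; exact absurd rfl h
    · simp only [if_neg hr1] at h ⊢
      have hr0 : 0 ≤ r := by
        have := PySem.Chars.neg_one_le_find (List.drop st.toNat (List.take (data.length:Int).toNat data)) ['>']
        omega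
      have hpre := (PySem.Chars.find_spec (by rw [← hr] at *; exact hr0)).1
      rw [← hr] at hpre
      rcases hpre with ⟨t, ht⟩
      have hlen : t.length + 1 = data.length - (st.toNat + r.toNat) := by
        have := congrArg List.length ht
        simpa using this
      refine ⟨by omega, by omega, by omega⟩


theorem pvSingPrefix (c : Char) (l : List Char) : [c] <+: l ↔ l.head? = some c := by
  cases l with
  | nil => simp
  | cons a t => simp [List.cons_prefix_cons, List.nil_prefix, eq_comm]

-- character and minimality facts of a successful find, for a nonnegative start
theorem pvFindGtChar (data : List Char) (i : Int) (hi : 0 ≤ i)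
    (h : PySem.Chars.findFrom data ['>'] i none ≠ -1) :
    data[(PySem.Chars.findFrom data ['>'] i none).toNat]? = some '>' ∧
    ∀ q : Nat, i ≤ (q : Int) → (q : Int) < PySem.Chars.findFrom data ['>'] i none →
      data[q]? ≠ some '>' := by
  obtain ⟨h1, h2, h3⟩ := pvFindGtBounds data i h
  have hcast : i = ((i.toNat : Nat) : Int) := by omega
  have hle : i.toNat ≤ data.length := by omega
  rw [hcast] at h
  obtain ⟨hk, hpre, hmin⟩ := PySem.Chars.findFrom_natCast_spec data ['>'] i.toNat hle h
  rw [← hcast] at hpre hmin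
  constructor
  · rw [← List.head?_drop]
    exact (pvSingPrefix _ _).mp hpre
  · intro q hq1 hq2 hq3
    exact hmin q (by omega) (by omega) ((pvSingPrefix _ _).mpr (by rw [List.head?_drop]; exact hq3))

theorem pvFindGtNone (data : List Char) (i : Int) (hi : 0 ≤ i)
    (h : PySem.Chars.findFrom data ['>'] i none = -1) :
    ∀ q : Nat, i ≤ (q : Int) → q < data.length → data[q]? ≠ some '>' := by
  intro q hq1 hq2 hq3
  by_cases hle : i ≤ (data.length : Int)
  · have hcast : i = ((i.toNat : Nat) : Int) := by omega
    rw [hcast] at h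
    have hni := (PySem.Chars.findFrom_natCast_eq_neg_one_iff data ['>'] i.toNat (by omega)).mp h
    apply hni
    apply (List.singleton_infix_iff _ _).mpr
    have hm : (List.drop i.toNat data)[q - i.toNat]? = some '>' := by
      rw [List.getElem?_drop, show i.toNat + (q - i.toNat) = q by omega]; exact hq3
    exact List.mem_of_getElem? hm
  · omega

-- equation lemmas for the four recursions
theorem pvLoopA_eq_none {data : List Char} {i : Int} (h : PySem.List.pyGet? data i = none) :
    pvLoopA data i = 0 := by
  rw [pvLoopA]; split <;> simp_all

theorem pvLoopA_eq_some {data : List Char} {i : Int} {c : Char}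
    (h : PySem.List.pyGet? data i = some c) :
    pvLoopA data i =
      (if c = '!' then pvLoopA data (i + 2) else if c = '>' then i + 1 else pvLoopA data (i + 1)) := by
  rw [pvLoopA]; split <;> simp_all

theorem pvLoopB_none {data : List Char} {i : Int}
    (h : PySem.Chars.findFrom data ['>'] i none = -1) : pvLoopB data i = 0 := by
  rw [pvLoopB]; simp [h]

theorem pvLoopB_some {data : List Char} {i : Int}
    (h : ¬ PySem.Chars.findFrom data ['>'] i none = -1) :
    pvLoopB data i =
      (if PySem.Int.mod (PySem.Chars.findFrom data ['>'] i none - pvRun data i (PySem.Chars.findFrom data ['>'] i none)) 2 = 0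
       then PySem.Chars.findFrom data ['>'] i none + 1
       else pvLoopB data (PySem.Chars.findFrom data ['>'] i none + 1)) := by
  have hb := pvFindGtBounds data i h
  rw [pvLoopB]
  simp only [h, if_false]
  rw [dif_pos (by omega : i < PySem.Chars.findFrom data ['>'] i none + 1 ∧ PySem.Chars.findFrom data ['>'] i none < (data.length : Int))]

theorem pvRun_step {data : List Char} {i k : Int}
    (h : i < k ∧ PySem.List.pyGet? data (k - 1) = some '!') :
    pvRun data i k = pvRun data i (k - 1) := by
  rw [pvRun, dif_pos h]

theorem pvRun_stop {data : List Char} {i k : Int}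
    (h : ¬ (i < k ∧ PySem.List.pyGet? data (k - 1) = some '!')) :
    pvRun data i k = k := by
  rw [pvRun, dif_neg h]

-- moving the cut-off up by one past a non-'!' does not change the run's end
theorem pvRun_shift1 (data : List Char) (i : Int)
    (hc : PySem.List.pyGet? data i ≠ some '!') :
    ∀ (n : Nat) (k : Int), (k - (i + 1)).toNat ≤ n → i + 1 ≤ k →
      pvRun data i k = pvRun data (i + 1) k := by
  intro n
  induction n with
  | zero =>
    intro k hn hik
    have hk : k = i + 1 := by omega
    subst hk
    have h1 : pvRun data (i + 1) (i + 1) = i + 1 := pvRun_stop (fun h => lt_irrefl _ h.1)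
    have h2 : pvRun data i (i + 1) = i + 1 :=
      pvRun_stop (by rw [show i + 1 - 1 = i by ring]; intro h; exact hc h.2)
    rw [h1, h2]
  | succ n ih =>
    intro k hn hik
    by_cases hk : k = i + 1
    · subst hk
      have h1 : pvRun data (i + 1) (i + 1) = i + 1 := pvRun_stop (fun h => lt_irrefl _ h.1)
      have h2 : pvRun data i (i + 1) = i + 1 :=
        pvRun_stop (by rw [show i + 1 - 1 = i by ring]; intro h; exact hc h.2)
      rw [h1, h2]
    · by_cases hch : PySem.List.pyGet? data (k - 1) = some '!'
      · rw [pvRun_step ⟨by omega, hch⟩, pvRun_step ⟨by omega, hch⟩]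
        exact ih (k - 1) (by omega) (by omega)
      · rw [pvRun_stop (by tauto), pvRun_stop (by tauto)]

-- moving the cut-off up by two past a '!' keeps the run's end or shortens it by exactly 2
theorem pvRun_shift2_base (data : List Char) (i : Int)
    (hc : PySem.List.pyGet? data i = some '!') :
    pvRun data i (i + 2) = pvRun data (i + 2) (i + 2) ∨
    (pvRun data (i + 2) (i + 2) = i + 2 ∧ pvRun data i (i + 2) = i) := by
  have h0 : pvRun data (i + 2) (i + 2) = i + 2 := pvRun_stop (fun h => lt_irrefl _ h.1)
  rw [h0]
  by_cases hch : PySem.List.pyGet? data (i + 2 - 1) = some '!'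
  · right
    refine ⟨rfl, ?_⟩
    rw [pvRun_step ⟨by omega, hch⟩]
    rw [show i + 2 - 1 = i + 1 by ring]
    rw [pvRun_step ⟨by omega, by rw [show i + 1 - 1 = i by ring]; exact hc⟩]
    rw [show i + 1 - 1 = i by ring]
    rw [pvRun_stop (fun h => lt_irrefl _ h.1)]
  · left; rw [pvRun_stop (by tauto)]

theorem pvRun_shift2 (data : List Char) (i : Int)
    (hc : PySem.List.pyGet? data i = some '!') :
    ∀ (n : Nat) (k : Int), (k - (i + 2)).toNat ≤ n → i + 2 ≤ k →
      pvRun data i k = pvRun data (i + 2) k ∨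
      (pvRun data (i + 2) k = i + 2 ∧ pvRun data i k = i) := by
  intro n
  induction n with
  | zero =>
    intro k hn hik
    have hk : k = i + 2 := by omega
    subst hk
    exact pvRun_shift2_base data i hc
  | succ n ih =>
    intro k hn hik
    by_cases hk : k = i + 2
    · subst hk
      exact pvRun_shift2_base data i hc
    · by_cases hch : PySem.List.pyGet? data (k - 1) = some '!'
      · rw [pvRun_step ⟨by omega, hch⟩, pvRun_step ⟨by omega, hch⟩]
        exact ih (k - 1) (by omega) (by omega)
      · left; rw [pvRun_stop (by tauto), pvRun_stop (by tauto)]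

theorem pvLoopA_at_gt (L : List Char) (jn : Nat) (hj : L[jn]? = some '>') :
    pvLoopA L (jn : Int) = (jn : Int) + 1 := by
  have hg : PySem.List.pyGet? L (jn : Int) = some '>' := by
    rw [PySem.List.pyGet?_natCast]; exact hj
  rw [pvLoopA_eq_some hg, if_neg (by decide), if_pos rfl]

-- A's scan across the block ending at the first '>' (at jn): it returns jn + 1 when the
-- '!'-run before jn is even, and continues at jn + 1 when it is odd
theorem pvLoopA_block (L : List Char) (jn : Nat) (hj : L[jn]? = some '>') :
    ∀ (n : Nat) (i : Int), 0 ≤ i → i ≤ (jn : Int) → ((jn : Int) - i).toNat ≤ n →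
    (∀ q : Nat, i ≤ (q : Int) → q < jn → L[q]? ≠ some '>') →
    pvLoopA L i =
      if ((jn : Int) - pvRun L i (jn : Int)) % 2 = 0 then (jn : Int) + 1
      else pvLoopA L ((jn : Int) + 1) := by
  have hjlen : jn < L.length := (List.getElem?_eq_some_iff.mp hj).1
  intro n
  induction n with
  | zero =>
    intro i hi0 hij hn hmin
    have : i = (jn : Int) := by omega
    subst this
    rw [pvRun_stop (fun h => lt_irrefl _ h.1)]
    simp only [sub_self]
    norm_num
    exact pvLoopA_at_gt L jn hj
  | succ n ih =>
    intro i hi0 hij hn hmin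
    by_cases hieq : i = (jn : Int)
    · subst hieq
      rw [pvRun_stop (fun h => lt_irrefl _ h.1)]
      simp only [sub_self]
      norm_num
      exact pvLoopA_at_gt L jn hj
    · have hilt : i < (jn : Int) := by omega
      have hg : PySem.List.pyGet? L i = some L[i.toNat] := by
        apply PySem.List.pyGet?_eq_some_getElem <;> omega
      have hne_gt : L[i.toNat] ≠ '>' := by
        intro hcon
        exact hmin i.toNat (by omega) (by omega) (by
          rw [List.getElem?_eq_getElem (by omega), hcon])
      by_cases hbang : L[i.toNat] = '!'
      · have hgb : PySem.List.pyGet? L i = some '!' := by rw [hg, hbang]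
        rw [pvLoopA_eq_some hgb, if_pos rfl]
        by_cases hij1 : i + 1 = (jn : Int)
        · -- the '!' escapes this '>'; the run is exactly 1, odd
          have hrun : pvRun L i (jn : Int) = i := by
            rw [pvRun_step ⟨by omega, by rw [show (jn : Int) - 1 = i by omega]; exact hgb⟩]
            rw [show (jn : Int) - 1 = i by omega]
            rw [pvRun_stop (fun h => lt_irrefl _ h.1)]
          rw [hrun, if_neg (by omega)]
          rw [show i + 2 = (jn : Int) + 1 by omega]
        · have hih := ih (i + 2) (by omega) (by omega) (by omega)
            (fun q hq1 hq2 => hmin q (by omega) hq2)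
          rw [hih]
          rcases pvRun_shift2 L i hgb (((jn : Int) - (i + 2)).toNat) (jn : Int)
              (le_refl _) (by omega) with hr | ⟨hr1, hr2⟩
          · rw [hr]
          · rw [hr1, hr2]
            have hpar : (((jn : Int) - i) % 2 = 0) ↔ (((jn : Int) - (i + 2)) % 2 = 0) := by omega
            by_cases hp : ((jn : Int) - (i + 2)) % 2 = 0
            · rw [if_pos hp, if_pos (hpar.mpr hp)]
            · rw [if_neg hp, if_neg (fun hc => hp (hpar.mp hc))]
      · rw [pvLoopA_eq_some hg, if_neg hbang, if_neg hne_gt]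
        have hrun : pvRun L i (jn : Int) = pvRun L (i + 1) (jn : Int) :=
          pvRun_shift1 L i (by rw [hg]; simpa using hbang) (((jn : Int) - (i + 1)).toNat)
            (jn : Int) (le_refl _) (by omega)
        rw [hrun]
        exact ih (i + 1) (by omega) (by omega) (by omega)
          (fun q hq1 hq2 => hmin q (by omega) hq2)

-- with no '>' ahead, A's scan runs off the end (Python IndexError; sentinel 0)
theorem pvLoopA_no_gt (L : List Char) :
    ∀ (n : Nat) (i : Int), 0 ≤ i → ((L.length : Int) - i).toNat ≤ n →
    (∀ q : Nat, i ≤ (q : Int) → q < L.length → L[q]? ≠ some '>') →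
    pvLoopA L i = 0 := by
  intro n
  induction n with
  | zero =>
    intro i hi0 hn hmin
    apply pvLoopA_eq_none
    rw [PySem.List.pyGet?_eq_none_iff]
    simp [PySem.Raise.InRange]
    omega
  | succ n ih =>
    intro i hi0 hn hmin
    by_cases hlen : (L.length : Int) ≤ i
    · apply pvLoopA_eq_none
      rw [PySem.List.pyGet?_eq_none_iff]
      simp [PySem.Raise.InRange]
      omega
    · have hg : PySem.List.pyGet? L i = some L[i.toNat] := by
        apply PySem.List.pyGet?_eq_some_getElem <;> omega
      have hne_gt : L[i.toNat] ≠ '>' := by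
        intro hcon
        exact hmin i.toNat (by omega) (by omega) (by
          rw [List.getElem?_eq_getElem (by omega), hcon])
      rw [pvLoopA_eq_some hg]
      by_cases hbang : L[i.toNat] = '!'
      · rw [if_pos hbang]
        exact ih (i + 2) (by omega) (by omega) (fun q hq1 hq2 => hmin q (by omega) hq2)
      · rw [if_neg hbang, if_neg hne_gt]
        exact ih (i + 1) (by omega) (by omega) (fun q hq1 hq2 => hmin q (by omega) hq2)

-- main agreement: for every nonnegative start, B's staged search equals A's scan
theorem pvLoopBA (L : List Char) :
    ∀ (n : Nat) (i : Int), 0 ≤ i → ((L.length : Int) - i).toNat ≤ n →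
      pvLoopB L i = pvLoopA L i := by
  intro n
  induction n with
  | zero =>
    intro i hi0 hn
    have hf : PySem.Chars.findFrom L ['>'] i none = -1 := by
      by_contra hne
      have := pvFindGtBounds L i hne
      omega
    rw [pvLoopB_none hf]
    symm
    apply pvLoopA_eq_none
    rw [PySem.List.pyGet?_eq_none_iff]
    simp [PySem.Raise.InRange]
    omega
  | succ n ih =>
    intro i hi0 hn
    by_cases hf : PySem.Chars.findFrom L ['>'] i none = -1
    · rw [pvLoopB_none hf]
      symm
      exact pvLoopA_no_gt L (((L.length : Int) - i).toNat) i hi0 (le_refl _)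
        (pvFindGtNone L i hi0 hf)
    · obtain ⟨hij, h0j, hjlen⟩ := pvFindGtBounds L i hf
      obtain ⟨hchar, hmin⟩ := pvFindGtChar L i hi0 hf
      set j : Int := PySem.Chars.findFrom L ['>'] i none with hjdef
      have hjcast : j = ((j.toNat : Nat) : Int) := by omega
      have hblock := pvLoopA_block L j.toNat (by exact hchar) ((j - i).toNat) i hi0
        (by omega) (by omega) (fun q hq1 hq2 => hmin q hq1 (by omega))
      rw [pvLoopB_some hf]
      rw [← hjdef] at *
      rw [← hjcast] at hblock
      rw [hblock]
      rw [PySem.Int.mod_eq_emod_of_pos (by omega)]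
      by_cases hp : (j - pvRun L i j) % 2 = 0
      · rw [if_pos hp, if_pos hp]
      · rw [if_neg hp, if_neg hp]
        exact ih (j + 1) (by omega) (by omega)

-- ===== VERDICT (by name: the statement is the Claim_ definition above) =====
theorem enter_garbage_spec : Claim_equal_enter_garbage := by
  intro data index _ hpre
  unfold Spec_enter_garbage enter_garbage enter_garbage_alt
  exact (pvLoopBA data.toList (((data.toList.length : Int) - index).toNat) index hpre.1
    (le_refl _)).symm
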